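-- pv_equiv track=rewrite | github.com/dedeswim/com-402-hw | hw3/hw3_3/old_attack.py | recursive_letter_changes
-- ===== SOURCE A (Python) =====
-- from typing import List, Dict, Tuple
--
-- def recursive_letter_changes(psw: str, couples: Dict[str, int]) -> List[str]:
--     if not psw:
--         return ['']
--
--     changed_list = []
--     rest_list = recursive_letter_changes(psw[1:], couples)
--
--     changed_list.append(list(map(lambda rest: psw[0] + rest, rest_list)))
--
--     if psw[0] in couples:
--         changed_list.append(list(map(lambda rest: str(couples[psw[0]]) + rest, rest_list)))
--
--     return [val for sublist in changed_list for val in sublist]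
-- ===== SOURCE B (Python) =====
-- def recursive_letter_changes(psw, couples):
--     results = ['']
--     for c in psw:
--         opts = [c, str(couples[c])] if c in couples else [c]
--         results = [r + o for r in results for o in opts]
--     return results
-- ===== Notes on version B (the rewrite author's own statement) =====
-- stated objective: simpler
-- what changed: Replaced the suffix recursion (map prefix onto recursive results twice, then flatten) by a single left-to-right fold that extends every accumulated prefix with the options for the next character.
import Mathlib
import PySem

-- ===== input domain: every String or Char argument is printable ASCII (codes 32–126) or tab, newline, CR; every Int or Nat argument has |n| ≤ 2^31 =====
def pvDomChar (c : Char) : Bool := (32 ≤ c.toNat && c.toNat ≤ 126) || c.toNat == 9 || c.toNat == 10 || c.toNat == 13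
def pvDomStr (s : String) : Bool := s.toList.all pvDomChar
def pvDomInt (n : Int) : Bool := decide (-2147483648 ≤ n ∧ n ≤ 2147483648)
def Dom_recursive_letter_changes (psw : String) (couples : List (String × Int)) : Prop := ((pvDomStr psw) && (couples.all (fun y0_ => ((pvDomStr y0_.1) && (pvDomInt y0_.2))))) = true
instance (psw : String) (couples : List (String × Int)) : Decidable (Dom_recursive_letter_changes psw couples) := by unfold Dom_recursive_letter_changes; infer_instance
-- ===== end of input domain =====

-- B changes structure only: a left fold over the characters instead of recursion on the suffix ('simpler').

-- shared helper: first-match lookup in the association list (dict[str,int])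
def pvLookup (couples : List (String × Int)) (k : String) : Option Int :=
  (couples.find? (fun p => p.1 == k)).map (·.2)

-- ===== PORT A =====
-- recursion over the character list (psw[1:] = the tail); branches in A's order
def pvRlcA (cs : List Char) (couples : List (String × Int)) : List String :=
  match cs with
  | [] => [""]
  | c :: rest =>
    let rest_list := pvRlcA rest couples
    let l1 := rest_list.map (fun r => String.ofList [c] ++ r)
    match pvLookup couples (String.ofList [c]) with
    | some v => l1 ++ rest_list.map (fun r => PySem.Int.toStr v ++ r)
    | none => l1

def recursive_letter_changes (psw : String) (couples : List (String × Int)) : List String :=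
  pvRlcA psw.toList couples

-- ===== PORT B =====
-- one fold step: extend every accumulated prefix with each option for character c
def pvRlcBStep (couples : List (String × Int)) (acc : List String) (c : Char) : List String :=
  let opts := match pvLookup couples (String.ofList [c]) with
    | some v => [String.ofList [c], PySem.Int.toStr v]
    | none => [String.ofList [c]]
  acc.flatMap (fun r => opts.map (fun o => r ++ o))

def recursive_letter_changes_alt (psw : String) (couples : List (String × Int)) : List String :=
  psw.toList.foldl (pvRlcBStep couples) [""]

-- ===== PRECONDITION & SPEC =====
def Spec_recursive_letter_changes (psw : String) (couples : List (String × Int)) (out : List String) : Prop := out = recursive_letter_changes_alt psw couples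
instance (psw : String) (couples : List (String × Int)) (out : List String) : Decidable (Spec_recursive_letter_changes psw couples out) := by unfold Spec_recursive_letter_changes; infer_instance

-- ===== CLAIM (what is proved, stated in full; the proofs are below) =====
def Claim_equal_recursive_letter_changes : Prop := ∀ (psw : String) (couples : List (String × Int)), Dom_recursive_letter_changes psw couples → Spec_recursive_letter_changes psw couples (recursive_letter_changes psw couples)

-- ===== LEMMAS AND PROOFS =====

-- A's recursion step written as flatMap over the option list of the B step
lemma pvRlcA_cons (c : Char) (rest : List Char) (couples : List (String × Int)) :
    pvRlcA (c :: rest) couples =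
      (match pvLookup couples (String.ofList [c]) with
        | some v => [String.ofList [c], PySem.Int.toStr v]
        | none => [String.ofList [c]]).flatMap
        (fun o => (pvRlcA rest couples).map (fun r => o ++ r)) := by
  cases h : pvLookup couples (String.ofList [c]) <;>
    simp [pvRlcA, h, List.flatMap]

-- loop invariant: folding the remaining characters distributes A's result for them over the accumulator
lemma pvFold_eq (cs : List Char) (couples : List (String × Int)) (acc : List String) :
    cs.foldl (pvRlcBStep couples) acc =
      acc.flatMap (fun r => (pvRlcA cs couples).map (fun s => r ++ s)) := by
  induction cs generalizing acc with
  | nil =>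
    simp [pvRlcA, List.flatMap_singleton']
  | cons c rest ih =>
    rw [List.foldl_cons, ih, pvRlcA_cons]
    simp only [pvRlcBStep, List.flatMap_assoc, List.flatMap_map, List.map_flatMap,
      List.map_map, Function.comp_def, String.append_assoc]

-- ===== VERDICT (by name: the statement is the Claim_ definition above) =====
theorem recursive_letter_changes_spec : Claim_equal_recursive_letter_changes := by
  intro psw couples _
  unfold Spec_recursive_letter_changes recursive_letter_changes recursive_letter_changes_alt
  rw [pvFold_eq]
  simp
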